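-- pv_equiv track=rewrite | github.com/srikanth0806/learn_py | C - data_types/Seqential/LISTS/separate_list.py | elements
-- ===== SOURCE A (Python) =====
-- def elements(li):
--     temp = []
--     j = 0
--     x = 1
--     while x <= len(li):
--         li1 = []
--         while j < x:
--             li1.append(li[j])
--             j = j + 1
--         temp.append(li1)
--         x = x + 3
--
--     return temp
-- ===== SOURCE B (Python) =====
-- def elements(li):
--     # one pass with slices: first chunk of size 1, then chunks of size 3,
--     # stopping as soon as a full chunk no longer fits (trailing items dropped)
--     temp = []
--     i, size = 0, 1
--     while i + size <= len(li):
--         temp.append(list(li[i:i + size]))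
--         i += size
--         size = 3
--     return temp
-- ===== Notes on version B (the rewrite author's own statement) =====
-- stated objective: simpler
-- what changed: Replaces the nested element-by-element while loops (with the index j carried across outer iterations) by a single loop that appends whole slices li[i:i+size] at precomputed chunk boundaries (size 1 then 3).
import Mathlib
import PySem

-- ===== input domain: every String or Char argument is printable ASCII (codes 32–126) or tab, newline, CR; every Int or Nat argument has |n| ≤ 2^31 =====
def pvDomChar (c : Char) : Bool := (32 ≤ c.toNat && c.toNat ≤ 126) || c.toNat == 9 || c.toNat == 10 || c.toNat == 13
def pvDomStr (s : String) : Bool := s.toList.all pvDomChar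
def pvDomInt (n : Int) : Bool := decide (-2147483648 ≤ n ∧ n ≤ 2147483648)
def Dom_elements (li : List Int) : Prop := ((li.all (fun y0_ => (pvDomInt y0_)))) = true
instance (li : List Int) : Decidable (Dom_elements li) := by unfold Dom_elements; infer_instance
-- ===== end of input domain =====

-- B replaces A's nested element-by-element while loops by a single loop appending
-- whole slices li[i:i+size] (size 1 then 3); same return value, simpler structure.

-- ===== PORT A =====
-- inner while loop: `while j < x: li1.append(li[j]); j = j + 1`
-- (li[j] is always in range when reached: 0 ≤ j < x ≤ len li; the getD 0 default is never used there)
def elementsInner (li li1 : List Int) (j x : Int) : List Int × Int :=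
  if j < x then
    elementsInner li (li1 ++ [(PySem.List.pyGet? li j).getD 0]) (j + 1) x
  else (li1, j)
termination_by (x - j).toNat
decreasing_by omega

-- outer while loop: `while x <= len(li): … ; temp.append(li1); x = x + 3`
def elementsOuter (li : List Int) (temp : List (List Int)) (j x : Int) : List (List Int) :=
  if h : x ≤ (li.length : Int) then
    let p := elementsInner li [] j x
    elementsOuter li (temp ++ [p.1]) p.2 (x + 3)
  else temp
termination_by ((li.length : Int) + 1 - x).toNat
decreasing_by omega

def elements (li : List Int) : List (List Int) :=
  elementsOuter li [] 0 1

-- ===== PORT B =====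
-- single loop: `while i + size <= len(li): temp.append(li[i:i+size]); i += size; size = 3`
-- fuel only guards totality (size is 1 then 3 in every reachable call, so len+1 steps suffice)
def altLoop : Nat → List Int → List (List Int) → Int → Int → List (List Int)
  | 0, _, temp, _, _ => temp
  | f + 1, li, temp, i, size =>
    if i + size ≤ (li.length : Int) then
      altLoop f li (temp ++ [PySem.List.slice li (some i) (some (i + size))]) (i + size) 3
    else temp

def elements_alt (li : List Int) : List (List Int) :=
  altLoop (li.length + 1) li [] 0 1

-- ===== PRECONDITION & SPEC =====
def Spec_elements (li : List Int) (out : List (List Int)) : Prop := out = elements_alt li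
instance (li : List Int) (out : List (List Int)) : Decidable (Spec_elements li out) := by unfold Spec_elements; infer_instance

-- ===== CLAIM (what is proved, stated in full; the proofs are below) =====
def Claim_equal_elements : Prop := ∀ (li : List Int), Dom_elements li → Spec_elements li (elements li)

-- ===== LEMMAS AND PROOFS =====

-- the inner while loop produces exactly the slice li[j:x] (as drop/take) and final index x
theorem elementsInner_eq (li : List Int) : ∀ (n : Nat) (j x : Int) (li1 : List Int),
    0 ≤ j → (x - j).toNat = n → j ≤ x → x ≤ (li.length : Int) →
    elementsInner li li1 j x = (li1 ++ (li.drop j.toNat).take n, x) := by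
  intro n
  induction n with
  | zero =>
    intro j x li1 hj hn hjx hx
    have hxj : ¬ j < x := by omega
    rw [elementsInner]
    simp [hxj]
    omega
  | succ n ih =>
    intro j x li1 hj hn hjx hx
    have hlt : j < x := by omega
    have hjlen : j.toNat < li.length := by omega
    rw [elementsInner]
    simp only [hlt, if_pos]
    rw [ih (j + 1) x _ (by omega) (by omega) (by omega) hx]
    have hget : PySem.List.pyGet? li j = some li[j.toNat] := by
      rw [PySem.List.pyGet?_of_nonneg li hj]
      exact List.getElem?_eq_getElem hjlen
    have hdrop : li.drop j.toNat = li[j.toNat] :: li.drop (j.toNat + 1) :=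
      List.drop_eq_getElem_cons hjlen
    have hj1 : (j + 1).toNat = j.toNat + 1 := by omega
    rw [hget, hj1, hdrop]
    simp
    rw [hdrop, List.take_succ_cons]

-- the two loops agree: A's state (j, x) corresponds to B's state (i = j, size = x - j)
theorem loops_eq (li : List Int) : ∀ (f : Nat) (temp : List (List Int)) (j x : Int),
    0 ≤ j → j < x → j.toNat ≤ li.length → li.length - j.toNat < f →
    elementsOuter li temp j x = altLoop f li temp j (x - j) := by
  intro f
  induction f with
  | zero => intro temp j x hj hjx hjlen hf; omega
  | succ f ih =>
    intro temp j x hj hjx hjlen hf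
    rw [elementsOuter, altLoop]
    have hsum : j + (x - j) = x := by ring
    rw [hsum]
    by_cases hx : x ≤ (li.length : Int)
    · simp only [hx, if_pos, dif_pos]
      rw [elementsInner_eq li (x - j).toNat j x [] hj rfl (by omega) hx]
      have hslice : PySem.List.slice li (some j) (some x)
          = (li.drop j.toNat).take ((x - j).toNat) := by
        rw [PySem.List.slice_toNat li hj (by omega)]
        congr 1
        omega
      rw [hslice]
      simp only [List.nil_append]
      rw [ih (temp ++ [(li.drop j.toNat).take (x - j).toNat]) x (x + 3)
        (by omega) (by omega) (by omega) (by omega)]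
      congr 1
      omega
    · simp [hx]

theorem elements_eq_alt (li : List Int) : elements li = elements_alt li := by
  unfold elements elements_alt
  have h := loops_eq li (li.length + 1) [] 0 1 (by omega) (by omega) (by omega) (by omega)
  simpa using h

-- ===== VERDICT (by name: the statement is the Claim_ definition above) =====
theorem elements_spec : Claim_equal_elements := by
  intro li _
  unfold Spec_elements
  exact elements_eq_alt li
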